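-- pv_equiv track=rewrite | github.com/danielbulhosa/CURL | model.py | generate_powers
-- ===== SOURCE A (Python) =====
-- def generate_powers(order, n_variables):
--     """
--     Find the exponents of a multivariate polynomial expression of order
--     `order` and `n_variable` number of variables.
--     From: https://stackoverflow.com/questions/4913902/optimize-generator-for-multivariate-polynomial-exponents
--     """
--     pattern = [0] * n_variables
--     yield tuple(pattern)
--     for current_sum in range(1, order+1):
--         pattern[0] = current_sum
--         yield tuple(pattern)
--         while pattern[-1] < current_sum:
--             for i in range(2, n_variables + 1):
--                 if 0 < pattern[n_variables - i]:
--                     pattern[n_variables - i] -= 1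
--                     if 2 < i:
--                         pattern[n_variables - i + 1] = 1 + pattern[-1]
--                         pattern[-1] = 0
--                     else:
--                         pattern[-1] += 1
--                     break
--             yield tuple(pattern)
--         pattern[-1] = 0
-- ===== SOURCE B (Python) =====
-- def generate_powers(order, n_variables):
--     """Exponent tuples of a polynomial of order `order` in `n_variables` variables:
--     the zero tuple, then for each total degree s = 1..order every exponent tuple of
--     degree s in first-coordinate-descending order, enumerated recursively by the
--     position j and value a of the leading nonzero exponent (no mutable state;
--     recursion depth is the number of nonzero exponents)."""
--     def comps(n, s):
--         # all length-n tuples of non-negative ints summing to s, descending lex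
--         if s == 0:
--             yield (0,) * n
--             return
--         for j in range(n):             # j = position of the first nonzero exponent
--             if j == n - 1:
--                 yield (0,) * j + (s,)  # no room after j: it takes all of s
--             else:
--                 for a in range(s, 0, -1):
--                     for rest in comps(n - j - 1, s - a):
--                         yield (0,) * j + (a,) + rest
--
--     yield from comps(n_variables, 0)
--     for s in range(1, order + 1):
--         yield from comps(n_variables, s)
-- ===== Notes on version B (the rewrite author's own statement) =====
-- stated objective: alternative
-- what changed: Replaces A's mutable-array odometer (in-place successor stepping with a backward carry scan) by a stateless recursive enumeration that, per total degree, recurses on the position and value of the leading nonzero exponent, building each tuple by concatenation.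
import Mathlib
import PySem

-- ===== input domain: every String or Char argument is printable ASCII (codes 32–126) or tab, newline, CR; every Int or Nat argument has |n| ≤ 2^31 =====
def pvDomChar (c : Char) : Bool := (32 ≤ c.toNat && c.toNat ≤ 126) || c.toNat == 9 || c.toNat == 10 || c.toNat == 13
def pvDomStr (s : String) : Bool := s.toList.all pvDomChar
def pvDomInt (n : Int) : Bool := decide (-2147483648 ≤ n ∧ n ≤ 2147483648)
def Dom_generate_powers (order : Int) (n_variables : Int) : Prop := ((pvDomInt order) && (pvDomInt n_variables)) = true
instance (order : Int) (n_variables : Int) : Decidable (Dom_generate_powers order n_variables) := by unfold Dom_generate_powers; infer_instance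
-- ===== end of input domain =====

-- B replaces A's in-place odometer (successor stepping of a shared array) by a stateless
-- per-degree recursion on the position and value of the leading nonzero exponent (alternative
-- decomposition, similar cost); equivalence is about the returned list of yielded tuples.

-- ===== PORT A =====
-- "for i in range(2, n_variables+1): if 0 < pattern[n_variables-i]: ... break"
-- (pattern[-1] is ported as index n-1: exact for the nonempty patterns reached under Pre_)
def pvInnerFor (p : List Int) (i n : Nat) : List Int :=
  if _h : i ≤ n then
    if 0 < p.getD (n - i) 0 then
      let p1 := p.set (n - i) (p.getD (n - i) 0 - 1)
      if 2 < i then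
        (p1.set (n - i + 1) (1 + p1.getD (n - 1) 0)).set (n - 1) 0
      else
        p1.set (n - 1) (p1.getD (n - 1) 0 + 1)
    else pvInnerFor p (i + 1) n
  else p  -- the for-loop fell through without break
termination_by n + 1 - i

-- "while pattern[-1] < current_sum: ... yield tuple(pattern)"; fuel only makes the
-- recursion total, it is proved sufficient on Pre_; returns (yields, final pattern)
def pvWhileA : Nat → List Int → Int → Nat → List (List Int) × List Int
  | 0, p, _, _ => ([], p)
  | fuel + 1, p, cs, n =>
    if p.getD (n - 1) 0 < cs then
      let p' := pvInnerFor p 2 n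
      let r := pvWhileA fuel p' cs n
      (p' :: r.1, r.2)
    else ([], p)

-- "for current_sum in range(1, order+1): pattern[0] = current_sum; yield ...; while ...; pattern[-1] = 0"
def pvOuterA : List Int → List Int → Nat → Nat → List (List Int)
  | [], _, _, _ => []
  | cs :: rest, p, n, fuel =>
    let p0 := p.set 0 cs
    let r := pvWhileA fuel p0 cs n
    (p0 :: r.1) ++ pvOuterA rest (r.2.set (n - 1) 0) n fuel

def generate_powers (order : Int) (n_variables : Int) : List (List Int) :=
  let n := n_variables.toNat  -- [0] * n_variables is empty for n_variables ≤ 0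
  let pattern := List.replicate n (0 : Int)
  pattern :: pvOuterA (PySem.List.pyRange 1 (order + 1) 1) pattern n ((order.toNat + 1) ^ n)

-- ===== PORT B =====
-- Source B's comps(n, s): all length-n tuples of non-negative ints summing to s, descending lex,
-- by recursion on the position j and value a of the leading nonzero exponent
-- (a runs s, s-1, …, 1, written as a = s - k for k in range(s))
def pvComps (n s : Nat) : List (List Int) :=
  if _hs : s = 0 then [List.replicate n (0 : Int)]
  else
    (List.range n).flatMap (fun j =>
      if j = n - 1 then [List.replicate j (0 : Int) ++ [(s : Int)]]
      else
        (List.range s).attach.flatMap (fun ⟨k, _hk⟩ =>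
          let a := s - k
          (pvComps (n - j - 1) (s - a)).map
            (fun rest => List.replicate j (0 : Int) ++ (a : Int) :: rest)))
termination_by s
decreasing_by have := List.mem_range.mp _hk; omega

def generate_powers_alt (order : Int) (n_variables : Int) : List (List Int) :=
  pvComps n_variables.toNat 0 ++
    (PySem.List.pyRange 1 (order + 1) 1).flatMap (fun s => pvComps n_variables.toNat s.toNat)

-- ===== PRECONDITION & SPEC =====
-- Pre_ excludes exactly the inputs where A raises IndexError (pattern[0] = current_sum on an
-- empty pattern): n_variables ≤ 0 together with order ≥ 1.
def Pre_generate_powers (order : Int) (n_variables : Int) : Prop :=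
  1 ≤ n_variables ∨ order ≤ 0
instance (order : Int) (n_variables : Int) : Decidable (Pre_generate_powers order n_variables) := by
  unfold Pre_generate_powers; infer_instance

def pvWitness_generate_powers : Int × Int := (3, 2)

def Spec_generate_powers (order : Int) (n_variables : Int) (out : List (List Int)) : Prop :=
  out = generate_powers_alt order n_variables
instance (order : Int) (n_variables : Int) (out : List (List Int)) : Decidable (Spec_generate_powers order n_variables out) := by
  unfold Spec_generate_powers; infer_instance

-- ===== CLAIM (what is proved, stated in full; the proofs are below) =====
def Claim_equal_generate_powers : Prop := ∀ (order : Int) (n_variables : Int), Dom_generate_powers order n_variables → Pre_generate_powers order n_variables → Spec_generate_powers order n_variables (generate_powers order n_variables)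

-- ===== LEMMAS AND PROOFS =====

-- proof-side simple characterisation of the enumeration: compositions of s into n parts,
-- first coordinate descending (written with k = s - firstCoordinate)
def cS : Nat → Nat → List (List Int)
  | 0, s => if s = 0 then [[]] else []
  | n + 1, s => (List.range (s + 1)).flatMap (fun k => (cS n k).map (fun r => ((s - k : Nat) : Int) :: r))

theorem cS_zero (n : Nat) : cS n 0 = [List.replicate n (0 : Int)] := by
  induction n with
  | zero => simp [cS]
  | succ m ih => simp [cS, ih, List.range_succ, List.replicate_succ]

theorem cS_one (s : Nat) : cS 1 s = [[(s : Int)]] := by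
  rw [cS, List.range_succ_eq_map]
  simp [cS]

theorem flatMap_congr_mem {α β : Type} (l : List α) (f g : α → List β)
    (h : ∀ a ∈ l, f a = g a) : l.flatMap f = l.flatMap g := by
  induction l with
  | nil => rfl
  | cons a t ih =>
    simp only [List.flatMap_cons, h a (by simp), ih (fun x hx => h x (by simp [hx]))]

theorem cS_succ_split (m s : Nat) :
    cS (m + 1) s =
      (List.range s).flatMap (fun k => (cS m k).map (fun r => ((s - k : Nat) : Int) :: r)) ++
        (cS m s).map (fun r => (0 : Int) :: r) := by
  rw [cS, List.range_succ, List.flatMap_append]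
  simp

-- the body of pvComps for s ≠ 0, with the inner recursion already replaced by cS
def gB (m s : Nat) (j : Nat) : List (List Int) :=
  if j = m then [List.replicate j (0 : Int) ++ [(s : Int)]]
  else (List.range s).flatMap
    (fun k => (cS (m - j) k).map (fun r => List.replicate j (0 : Int) ++ ((s - k : Nat) : Int) :: r))

theorem gB_flatMap (m s : Nat) (hs : s ≠ 0) :
    (List.range (m + 1)).flatMap (gB m s) = cS (m + 1) s := by
  induction m generalizing s with
  | zero =>
    rw [cS_one]
    simp [gB]
  | succ m ih =>
    rw [List.range_succ_eq_map, List.flatMap_cons, List.flatMap_map]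
    have h0 : gB (m + 1) s 0 =
        (List.range s).flatMap (fun k => (cS (m + 1) k).map (fun r => ((s - k : Nat) : Int) :: r)) := by
      simp [gB]
    have hsucc : ∀ j ∈ List.range (m + 1),
        gB (m + 1) s (j + 1) = (gB m s j).map (fun r => (0 : Int) :: r) := by
      intro j hj
      by_cases hjm : j = m
      · subst hjm
        simp [gB, List.replicate_succ]
      · have : ¬ (j + 1 = m + 1) := by omega
        simp only [gB, if_neg hjm, if_neg this]
        rw [List.map_flatMap]
        apply flatMap_congr_mem
        intro k hk
        rw [List.map_map]
        have : m + 1 - (j + 1) = m - j := by omega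
        rw [this]
        apply List.map_congr_left
        intro r hr
        simp [List.replicate_succ]
    rw [h0, flatMap_congr_mem _ _ _ hsucc, cS_succ_split]
    congr 1
    rw [← List.map_flatMap, ih s hs]

theorem pvComps_eq_cS (n s : Nat) : pvComps n s = cS n s := by
  induction n using Nat.strong_induction_on generalizing s with
  | _ n ih =>
    by_cases hs : s = 0
    · subst hs
      rw [pvComps, cS_zero]
      simp
    · rw [pvComps, dif_neg hs]
      cases n with
      | zero => simp [cS, hs]
      | succ m =>
        rw [← gB_flatMap m s hs]
        apply flatMap_congr_mem
        intro j hj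
        have hj' : j < m + 1 := List.mem_range.mp hj
        by_cases hjm : j = m
        · simp [gB, hjm]
        · have hne : ¬ (j = m + 1 - 1) := by omega
          rw [if_neg hne]
          simp only [gB, if_neg hjm]
          simp only [List.flatMap_subtype, List.unattach_attach]
          apply flatMap_congr_mem
          intro k hk
          have hks : k < s := List.mem_range.mp hk
          have h1 : s - (s - k) = k := by omega
          have h2 : m + 1 - j - 1 = m - j := by omega
          simp only [h1, h2, ih (m - j) (by omega)]

-- ---------- A-side: the inner for-loop computes the descending-lex successor ----------

-- the invariant relation along cS: p has a positive entry before the last slot,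
-- and the ported inner for-loop steps p to q
def RA (n : Nat) (p q : List Int) : Prop :=
  p.length = n ∧ (∃ j, j + 2 ≤ n ∧ 0 < p.getD j 0) ∧ pvInnerFor p 2 n = q

theorem getD_replicate_append (m : Nat) (t d : Int) :
    (List.replicate m (0 : Int) ++ [t]).getD m d = t := by
  induction m with
  | zero => rfl
  | succ k _ih => simp [List.replicate_succ]

theorem getD_replicate_append_lt (m k : Nat) (t : Int) (hk : k < m) :
    (List.replicate m (0 : Int) ++ [t]).getD k 0 = 0 := by
  induction m generalizing k with
  | zero => omega
  | succ m ih =>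
    cases k with
    | zero => simp [List.replicate_succ]
    | succ k => simpa [List.replicate_succ] using ih k (by omega)

theorem set_replicate_append (m : Nat) (t v : Int) :
    (List.replicate m (0 : Int) ++ [t]).set m v = List.replicate m (0 : Int) ++ [v] := by
  induction m with
  | zero => rfl
  | succ k ih => simp [List.replicate_succ, ih]

theorem innerFor_break (i : Nat) (a : Int) (p : List Int) (n : Nat) (h2 : 2 ≤ i) (hin : i ≤ n)
    (hp : 0 < p.getD (n - i) 0) :
    pvInnerFor (a :: p) i (n + 1) = a :: pvInnerFor p i n := by
  conv_lhs => rw [pvInnerFor]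
  conv_rhs => rw [pvInnerFor]
  rw [dif_pos (by omega : i ≤ n + 1), dif_pos hin]
  rw [show n + 1 - i = (n - i) + 1 by omega, List.getD_cons_succ]
  rw [if_pos hp, if_pos hp]
  by_cases h3 : 2 < i
  · rw [if_pos h3, if_pos h3]
    rw [show n - i + 1 + 1 = (n - i + 1) + 1 by omega, show n + 1 - 1 = (n - 1) + 1 by omega]
    simp only [List.set_cons_succ, List.getD_cons_succ]
  · rw [if_neg h3, if_neg h3]
    rw [show n + 1 - 1 = (n - 1) + 1 by omega]
    simp only [List.set_cons_succ, List.getD_cons_succ]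

theorem innerFor_shift (d : Nat) : ∀ (i : Nat) (a : Int) (p : List Int) (n : Nat),
    2 ≤ i → i + d = n → p.length = n →
    (∃ i', i ≤ i' ∧ i' ≤ n ∧ 0 < p.getD (n - i') 0) →
    pvInnerFor (a :: p) i (n + 1) = a :: pvInnerFor p i n := by
  induction d with
  | zero =>
    rintro i a p n h2 hd hlen ⟨i', hi1, hi2, hpos⟩
    have hii : i' = i := by omega
    rw [hii] at hpos
    exact innerFor_break i a p n h2 (by omega) hpos
  | succ d ihd =>
    rintro i a p n h2 hd hlen ⟨i', hi1, hi2, hpos⟩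
    by_cases hp : 0 < p.getD (n - i) 0
    · exact innerFor_break i a p n h2 (by omega) hp
    · conv_lhs => rw [pvInnerFor]
      conv_rhs => rw [pvInnerFor]
      rw [dif_pos (by omega : i ≤ n + 1), dif_pos (by omega : i ≤ n)]
      rw [show n + 1 - i = (n - i) + 1 by omega, List.getD_cons_succ]
      rw [if_neg hp, if_neg hp]
      apply ihd (i + 1) a p n (by omega) (by omega) hlen
      refine ⟨i', ?_, hi2, hpos⟩
      rcases Nat.lt_or_ge i i' with h | h
      · omega
      · exact absurd hpos (by rw [show i' = i by omega]; exact hp)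

theorem innerFor_skip (d : Nat) : ∀ (i : Nat) (p : List Int) (n : Nat),
    2 ≤ i → i + d = n → (∀ k, 1 ≤ k → k ≤ d → p.getD k 0 = 0) →
    pvInnerFor p i n = pvInnerFor p n n := by
  induction d with
  | zero => intro i p n _ hd _; rw [show i = n by omega]
  | succ d ihd =>
    intro i p n h2 hd hz
    rw [pvInnerFor, dif_pos (by omega : i ≤ n)]
    have : n - i = d + 1 := by omega
    rw [this, hz (d + 1) (by omega) (by omega)]
    rw [if_neg (by omega)]
    exact ihd (i + 1) p n (by omega) (by omega) (fun k h1 h2' => hz k h1 (by omega))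

theorem innerFor_boundary (m : Nat) (a t : Int) (ha : 0 < a) :
    pvInnerFor (a :: (List.replicate m (0 : Int) ++ [t])) 2 (m + 2) =
      (a - 1) :: (t + 1) :: List.replicate m (0 : Int) := by
  rw [innerFor_skip m 2 _ (m + 2) (by omega) (by omega) ?hz]
  case hz =>
    intro k h1 h2
    have : k = (k - 1) + 1 := by omega
    rw [this, List.getD_cons_succ]
    exact getD_replicate_append_lt m (k - 1) t (by omega)
  rw [pvInnerFor, dif_pos (le_refl (m + 2))]
  have e0 : m + 2 - (m + 2) = 0 := by omega
  rw [e0]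
  simp only [List.getD_cons_zero, List.set_cons_zero]
  rw [if_pos ha]
  cases m with
  | zero =>
    rw [if_neg (by omega)]
    simp
  | succ m' =>
    rw [if_pos (by omega)]
    rw [show m' + 1 + 2 - 1 = (m' + 1) + 1 by omega]
    rw [List.getD_cons_succ, getD_replicate_append]
    simp only [List.replicate_succ, List.cons_append, List.set_cons_succ, List.set_cons_zero]
    rw [set_replicate_append]
    rw [show (1 : Int) + t = t + 1 by ring]
    rw [← List.replicate_succ', List.replicate_succ]

theorem chain'_flatMap {α β : Type} (R : α → α → Prop) (S : β → β → Prop) (g : β → List α) :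
    ∀ (l : List β), List.IsChain S l → (∀ b ∈ l, g b ≠ []) → (∀ b ∈ l, List.IsChain R (g b)) →
    (∀ b c, S b c → b ∈ l → c ∈ l →
      ∀ x ∈ (g b).getLast?, ∀ y ∈ (g c).head?, R x y) →
    List.IsChain R (l.flatMap g) := by
  intro l
  induction l with
  | nil => intro _ _ _ _; simp
  | cons b l ih =>
    intro hS hne hbl hlink
    rw [List.flatMap_cons, List.isChain_append]
    refine ⟨hbl b (by simp), ?_, ?_⟩
    · exact ih hS.tail (fun c hc => hne c (by simp [hc])) (fun c hc => hbl c (by simp [hc]))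
        (fun c c' hcc' hc hc' => hlink c c' hcc' (by simp [hc]) (by simp [hc']))
    · intro x hx y hy
      cases l with
      | nil => simp at hy
      | cons c t =>
        rw [List.flatMap_cons, List.head?_append_of_ne_nil _ (hne c (by simp))] at hy
        exact hlink b c hS.rel_head (by simp) (by simp) x hx y hy

theorem head?_some_eq_cons {α : Type} (l : List α) (a : α) (h : l.head? = some a) :
    l = a :: l.tail := by
  cases l with
  | nil => simp at h
  | cons x t => simp_all

theorem cS_head (n s : Nat) (hn : 1 ≤ n) :
    (cS n s).head? = some ((s : Int) :: List.replicate (n - 1) (0 : Int)) := by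
  obtain ⟨m, rfl⟩ : ∃ m, n = m + 1 := ⟨n - 1, by omega⟩
  rw [cS, List.range_succ_eq_map, List.flatMap_cons, cS_zero]
  simp

theorem cS_ne_nil (n s : Nat) (hn : 1 ≤ n) : cS n s ≠ [] := by
  intro h
  have := cS_head n s hn
  rw [h] at this
  simp at this

theorem cS_getLast (n s : Nat) (hn : 1 ≤ n) :
    (cS n s).getLast? = some (List.replicate (n - 1) (0 : Int) ++ [(s : Int)]) := by
  induction n generalizing s with
  | zero => omega
  | succ m ih =>
    cases m with
    | zero => rw [cS_one]; rfl
    | succ m' =>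
      rw [cS_succ_split, List.getLast?_append_of_ne_nil _
        (by simp [cS_ne_nil (m' + 1) s (by omega)])]
      rw [List.getLast?_map, ih s (by omega)]
      simp [List.replicate_succ]

theorem cS_mem (n : Nat) : ∀ (s : Nat) (p : List Int), p ∈ cS n s →
    p.length = n ∧ (∀ x ∈ p, 0 ≤ x) ∧ p.sum = (s : Int) := by
  induction n with
  | zero =>
    intro s p hp
    by_cases hs : s = 0 <;> simp [cS, hs] at hp
    subst hs; subst hp; simp
  | succ m ih =>
    intro s p hp
    rw [cS] at hp
    simp only [List.mem_flatMap, List.mem_range, List.mem_map] at hp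
    obtain ⟨k, hk, r, hr, rfl⟩ := hp
    obtain ⟨hlen, hnn, hsum⟩ := ih k r hr
    refine ⟨by simp [hlen], ?_, ?_⟩
    · intro x hx
      rcases List.mem_cons.mp hx with rfl | hx
      · positivity
      · exact hnn x hx
    · simp only [List.sum_cons, hsum]
      have : k ≤ s := by omega
      push_cast [Nat.cast_sub this]
      ring

theorem RA_cons (c : Int) (n : Nat) (p q : List Int) (h : RA n p q) :
    RA (n + 1) (c :: p) (c :: q) := by
  obtain ⟨hlen, ⟨j, hj2, hjpos⟩, hstep⟩ := h
  refine ⟨by simp [hlen], ⟨j + 1, by omega, by simpa using hjpos⟩, ?_⟩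
  rw [innerFor_shift (n - 2) 2 c p n (le_refl 2) (by omega) hlen
    ⟨n - j, by omega, by omega, by rw [show n - (n - j) = j by omega]; exact hjpos⟩]
  rw [hstep]

theorem chain_cS (n : Nat) (hn : 1 ≤ n) : ∀ (s : Nat), List.IsChain (RA n) (cS n s) := by
  induction n with
  | zero => omega
  | succ m ih =>
    intro s
    cases m with
    | zero => rw [cS_one]; exact List.isChain_singleton _
    | succ m' =>
      have hm : 1 ≤ m' + 1 := by omega
      rw [cS]
      apply chain'_flatMap (RA (m' + 1 + 1)) (fun k k' => k' = k + 1)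
      · rw [List.isChain_iff_getElem]
        intro i hi
        simp
      · intro k _
        simp [cS_ne_nil (m' + 1) k hm]
      · intro k _
        rw [List.isChain_map]
        exact (ih hm k).imp (fun a b h => RA_cons _ _ _ _ h)
      · intro k k' hkk' hk hk' x hx y hy
        subst hkk'
        have hk's : k + 1 ≤ s := by simpa using List.mem_range.mp hk'
        rw [List.getLast?_map, cS_getLast (m' + 1) k hm] at hx
        rw [List.head?_map, cS_head (m' + 1) (k + 1) hm] at hy
        simp only [Option.mem_def, Option.map_some, Option.some.injEq] at hx hy
        subst hx; subst hy
        refine ⟨by simp, ⟨0, by omega, ?_⟩, ?_⟩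
        · simp only [List.getD_cons_zero]
          have : 0 < s - k := by omega
          exact_mod_cast Int.natCast_pos.mpr this
        · have hb := innerFor_boundary (m' + 1 - 1) ((s - k : Nat) : Int) ((k : Nat) : Int)
            (by exact_mod_cast Int.natCast_pos.mpr (by omega : 0 < s - k))
          rw [show m' + 1 - 1 = m' by omega] at hb
          rw [show m' + 1 + 1 = m' + 2 by omega] at *
          rw [show (m' + 1 : Nat) - 1 = m' by omega]
          rw [hb]
          have e1 : ((s - k : Nat) : Int) - 1 = ((s - (k + 1) : Nat) : Int) := by
            push_cast [Nat.cast_sub (by omega : k ≤ s), Nat.cast_sub (by omega : k + 1 ≤ s)]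
            ring
          have e2 : ((k : Nat) : Int) + 1 = ((k + 1 : Nat) : Int) := by push_cast; ring
          rw [e1, e2]

theorem lastEntry_lt (n s : Nat) (p : List Int) (hn : 1 ≤ n) (hp : p ∈ cS n s)
    (hw : ∃ j, j + 2 ≤ n ∧ 0 < p.getD j 0) : p.getD (n - 1) 0 < (s : Int) := by
  obtain ⟨hlen, hnn, hsum⟩ := cS_mem n s p hp
  obtain ⟨j, hj2, hjpos⟩ := hw
  have hne : p ≠ [] := by intro h; rw [h] at hlen; simp at hlen; omega
  obtain ⟨q, x, rfl⟩ : ∃ q x, p = q ++ [x] := by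
    cases hrev : p.reverse with
    | nil => exact absurd (by simpa using congrArg List.reverse hrev) hne
    | cons y t =>
      refine ⟨t.reverse, y, ?_⟩
      have := congrArg List.reverse hrev
      simpa using this
  have hqlen : q.length = n - 1 := by simp at hlen; omega
  have hgetx : (q ++ [x]).getD (n - 1) 0 = x := by
    rw [← hqlen, List.getD_append_right q [x] 0 q.length (le_refl _)]
    simp
  rw [hgetx]
  have hjq : j < q.length := by omega
  have hgj : (q ++ [x]).getD j 0 = q.getD j 0 := List.getD_append _ _ _ _ hjq
  rw [hgj] at hjpos
  have hqj : q.getD j 0 = q[j] := List.getD_eq_getElem q 0 hjq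
  have hmem : q[j] ∈ q := List.getElem_mem hjq
  have hle : q[j] ≤ q.sum :=
    List.single_le_sum (fun y hy => hnn y (by simp [hy])) _ hmem
  have hx : q.sum + x = (s : Int) := by simpa using hsum
  rw [hqj] at hjpos
  omega

theorem while_run (n s : Nat) (cs : Int) (hcs : cs = (s : Int)) (hn : 1 ≤ n) :
    ∀ (l2 : List (List Int)) (p : List Int) (fuel : Nat), l2.length ≤ fuel →
    List.IsChain (RA n) (p :: l2) → (∀ q ∈ p :: l2, q ∈ cS n s) →
    (p :: l2).getLast? = some (List.replicate (n - 1) (0 : Int) ++ [(s : Int)]) →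
    pvWhileA fuel p cs n = (l2, List.replicate (n - 1) (0 : Int) ++ [(s : Int)]) := by
  intro l2
  induction l2 with
  | nil =>
    intro p fuel _ _ _ hlast
    have hp : p = List.replicate (n - 1) (0 : Int) ++ [(s : Int)] := by simpa using hlast
    subst hp
    cases fuel with
    | zero => rfl
    | succ f =>
      rw [pvWhileA]
      rw [if_neg ?_]
      rw [getD_replicate_append, hcs]
      omega
  | cons q l2' ih =>
    intro p fuel hfuel hchain hmem hlast
    cases fuel with
    | zero => simp at hfuel
    | succ f =>
      have hRA := hchain.rel_head
      have hchain' := hchain.tail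
      obtain ⟨hlen, hw, hstep⟩ := hRA
      have hlt : p.getD (n - 1) 0 < cs := by
        rw [hcs]
        exact lastEntry_lt n s p hn (hmem p (by simp)) hw
      rw [pvWhileA, if_pos hlt]
      have hres := ih q f (by simpa using hfuel) hchain'
        (fun r hr => hmem r (List.mem_cons_of_mem _ hr))
        (by rwa [List.getLast?_cons_cons] at hlast)
      rw [hstep]
      simp only [hres]
  
theorem len_cS (n : Nat) : ∀ (s : Nat), (cS n s).length ≤ (s + 1) ^ n := by
  induction n with
  | zero => intro s; by_cases hs : s = 0 <;> simp [cS, hs]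
  | succ m ih =>
    intro s
    rw [cS, List.length_flatMap]
    have hb : ∀ x ∈ (List.range (s + 1)).map
        (fun k => ((cS m k).map (fun r => ((s - k : Nat) : Int) :: r)).length), x ≤ (s + 1) ^ m := by
      intro x hx
      obtain ⟨k, hk, rfl⟩ := List.mem_map.mp hx
      rw [List.length_map]
      exact le_trans (ih k) (Nat.pow_le_pow_left (by simp at hk; omega) m)
    calc ((List.range (s + 1)).map _).sum
        ≤ ((List.range (s + 1)).map
            (fun k => ((cS m k).map (fun r => ((s - k : Nat) : Int) :: r)).length)).length
            • ((s + 1) ^ m) := List.sum_le_card_nsmul _ _ hb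
      _ = (s + 1) * (s + 1) ^ m := by simp [smul_eq_mul]
      _ = (s + 1) ^ (m + 1) := by ring

theorem outer_run (n : Nat) (hn : 1 ≤ n) (fuel : Nat) :
    ∀ (csl : List Int), (∀ cs ∈ csl, 1 ≤ cs ∧ (cS n cs.toNat).length ≤ fuel + 1) →
    pvOuterA csl (List.replicate n (0 : Int)) n fuel = csl.flatMap (fun cs => cS n cs.toNat) := by
  intro csl
  induction csl with
  | nil => intro _; rfl
  | cons cs rest ih =>
    intro hcs
    obtain ⟨hcs1, hcslen⟩ := hcs cs (by simp)
    set s := cs.toNat with hsdef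
    have hcast : cs = (s : Int) := by omega
    have hp0 : (List.replicate n (0 : Int)).set 0 cs = (s : Int) :: List.replicate (n - 1) 0 := by
      obtain ⟨m, rfl⟩ : ∃ m, n = m + 1 := ⟨n - 1, by omega⟩
      rw [List.replicate_succ, List.set_cons_zero, hcast]
      simp
    have hcons : cS n s = ((s : Int) :: List.replicate (n - 1) 0) :: (cS n s).tail :=
      head?_some_eq_cons _ _ (cS_head n s hn)
    have hwhile := while_run n s cs hcast hn (cS n s).tail ((s : Int) :: List.replicate (n - 1) 0)
      fuel (by have := len_cS n s; rw [hcons] at this ⊢; simp at this ⊢; omega)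
      (by rw [← hcons]; exact chain_cS n hn s)
      (by rw [← hcons]; intro q hq; exact hq)
      (by rw [← hcons]; exact cS_getLast n s hn)
    rw [pvOuterA, hp0]
    simp only [hwhile]
    have hreset : (List.replicate (n - 1) (0 : Int) ++ [(s : Int)]).set (n - 1) 0
        = List.replicate n (0 : Int) := by
      rw [set_replicate_append, ← List.replicate_succ']
      congr 1
      omega
    rw [hreset, ih (fun c hc => hcs c (by simp [hc]))]
    rw [List.flatMap_cons, ← hsdef, ← hcons]

theorem generate_powers_spec : Claim_equal_generate_powers := by
  intro order n_variables _hdom hpre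
  unfold Spec_generate_powers generate_powers generate_powers_alt
  simp only [pvComps_eq_cS, cS_zero]
  by_cases hn : 1 ≤ n_variables
  · have hn' : 1 ≤ n_variables.toNat := by omega
    rw [outer_run n_variables.toNat hn' ((order.toNat + 1) ^ n_variables.toNat)
      (PySem.List.pyRange 1 (order + 1) 1) ?hfuel]
    · simp
    case hfuel =>
      intro cs hcs
      have hmem := (PySem.List.mem_pyRange_one).mp hcs
      refine ⟨hmem.1, ?_⟩
      have h1 : cs.toNat + 1 ≤ order.toNat + 1 := by omega
      have := le_trans (len_cS n_variables.toNat cs.toNat)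
        (Nat.pow_le_pow_left h1 n_variables.toNat)
      omega
  · have ho : order ≤ 0 := by
      rcases hpre with h | h
      · omega
      · exact h
    have hr : PySem.List.pyRange 1 (order + 1) 1 = [] := by
      rw [PySem.List.pyRange_one]
      rw [show (order + 1 - 1).toNat = 0 by omega]
      simp
    rw [hr]
    simp [pvOuterA]
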